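-- pv_equiv track=rewrite | github.com/ishaanpatel-r/Spell-Correction-Methods-Comparison | spell_corrector.py | soundex_comparison
-- ===== SOURCE A (Python) =====
-- def soundex_comparison(main_word, check_word):
--
-- 	soundex_replacement_table = {
-- 			'a' : 0, 'b' : 1, 'c' : 2, 'd' : 3, 'e' : 0,
-- 			'f' : 1, 'g' : 2, 'h' : 0, 'i' : 0, 'j' : 2,
-- 			'k' : 2, 'l' : 4, 'm' : 5, 'n' : 5, 'o' : 0,
-- 			'p' : 1, 'q' : 2, 'r' : 6, 's' : 2, 't' : 3,
-- 			'u' : 0, 'v' : 1, 'w' : 0, 'x' : 2, 'y' : 0,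
-- 			'z' : 2
-- 		}
--
-- 	def f7(seq):
-- 	    seen = set()
-- 	    seen_add = seen.add
-- 	    return [x for x in seq if not (x in seen or seen_add(x))]
--
-- 	def get_soundex(word):
--
-- 		# replace each character with soundex except first
-- 		soundex = [word[0]] + [soundex_replacement_table[i] for i in word[1:]]
--
-- 		# remove consequent duplicates
-- 		soundex = f7(soundex)
--
-- 		# remove all 0s
-- 		soundex = [i for i in soundex if i != 0]
--
-- 		return soundex
--
-- 	score = 0
-- 	main_word_soundex = get_soundex(main_word)
-- 	check_word_soundex = get_soundex(check_word)
--
-- 	if len(main_word_soundex) == len(check_word_soundex):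
-- 		score += 1
-- 	else:
-- 		score -= 1
--
-- 	if len(main_word) - 2 < len(check_word) < len(main_word) + 2:
-- 		score += 1
-- 	else:
-- 		score -= 1
--
-- 	return score
-- ===== SOURCE B (Python) =====
-- def soundex_comparison(main_word, check_word):
--
-- 	# the six soundex consonant classes, indexed by their code 1..6
-- 	soundex_groups = ["bfpv", "cgjkqsxz", "dt", "l", "mn", "r"]
--
-- 	def soundex_len(word):
-- 		# length of the soundex code: the first character contributes 1,
-- 		# and each of the six classes contributes 1 iff some character of
-- 		# word[1:] belongs to it (duplicates and vowels never contribute)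
-- 		tail = word[1:]
-- 		return 1 + sum(1 for g in soundex_groups if any(c in g for c in tail))
--
-- 	score = 1 if soundex_len(main_word) == soundex_len(check_word) else -1
-- 	score += 1 if len(main_word) - 2 < len(check_word) < len(main_word) + 2 else -1
-- 	return score
-- ===== Notes on version B (the rewrite author's own statement) =====
-- stated objective: alternative
-- what changed: B drops the char->code table, the soundex lists and the dedup/filter passes entirely: it enumerates the six fixed soundex consonant classes and counts, per word, how many classes intersect word[1:] (that count + 1 is the soundex-code length), then applies the same two length comparisons.
-- outside the precondition, e.g. on soundex_comparison('', 'ab'): A raises IndexError, B returns -2; on soundex_comparison('a!', 'ab'): A raises KeyError, B returns 0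
import Mathlib
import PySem

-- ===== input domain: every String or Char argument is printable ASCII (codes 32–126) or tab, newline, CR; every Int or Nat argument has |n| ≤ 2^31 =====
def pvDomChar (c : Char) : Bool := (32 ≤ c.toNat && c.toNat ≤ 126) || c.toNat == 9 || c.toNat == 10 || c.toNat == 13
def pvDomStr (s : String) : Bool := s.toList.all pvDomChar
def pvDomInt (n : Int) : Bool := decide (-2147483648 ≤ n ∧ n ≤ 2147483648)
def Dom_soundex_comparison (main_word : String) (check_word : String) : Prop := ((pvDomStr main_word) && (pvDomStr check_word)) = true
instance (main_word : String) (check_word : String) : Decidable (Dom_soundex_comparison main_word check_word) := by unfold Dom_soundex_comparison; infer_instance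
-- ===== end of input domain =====

-- B drops the char->code table and the soundex lists entirely: it counts how many of the six
-- fixed soundex consonant classes intersect word[1:] (that count + 1 is the code length);
-- objective: alternative (different data structure, similar cost).


-- the soundex_replacement_table dict literal of A
def pvSoundexTable : PySem.Dict Char Int := PySem.Dict.ofList
  [('a', 0), ('b', 1), ('c', 2), ('d', 3), ('e', 0),
   ('f', 1), ('g', 2), ('h', 0), ('i', 0), ('j', 2),
   ('k', 2), ('l', 4), ('m', 5), ('n', 5), ('o', 0),
   ('p', 1), ('q', 2), ('r', 6), ('s', 2), ('t', 3),
   ('u', 0), ('v', 1), ('w', 0), ('x', 2), ('y', 0),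
   ('z', 2)]

-- ===== PORT A =====
-- elements of A's soundex list: the first char (a 1-char str) or an int code
inductive PvSEl
  | ch : Char → PvSEl
  | code : Int → PvSEl
deriving DecidableEq, Repr

-- f7: the dedup loop — 'seen' is a Python set, output kept in insertion order
def pvF7go (seen : PySem.Set PvSEl) (acc : List PvSEl) : List PvSEl → List PvSEl
  | [] => acc.reverse
  | x :: xs => if x ∈ seen then pvF7go seen acc xs
               else pvF7go (PySem.Set.add seen x) (x :: acc) xs

def pvF7 (seq : List PvSEl) : List PvSEl := pvF7go PySem.Set.empty [] seq

def pvGetSoundex (word : List Char) : List PvSEl :=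
  -- word[0]: none = IndexError (empty word), excluded by Pre_; default never reaches Python
  let head := (PySem.List.pyGet? word 0).getD ' '
  -- table[i]: missing key = KeyError (char not in 'a'..'z'), excluded by Pre_
  let soundex := PvSEl.ch head :: (word.drop 1).map (fun c => PvSEl.code (PySem.Dict.getD pvSoundexTable c 0) : Char → PvSEl)
  let soundex := pvF7 soundex
  soundex.filter (fun i => i ≠ PvSEl.code 0)  -- 'i != 0': the first char compares unequal to the int 0

def soundex_comparison (main_word : String) (check_word : String) : Int :=
  let score : Int := 0
  let main_word_soundex := pvGetSoundex main_word.toList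
  let check_word_soundex := pvGetSoundex check_word.toList
  let score := if main_word_soundex.length = check_word_soundex.length then score + 1 else score - 1
  let score := if PySem.Str.len main_word - 2 < PySem.Str.len check_word ∧
                  PySem.Str.len check_word < PySem.Str.len main_word + 2 then score + 1 else score - 1
  score

-- ===== PORT B =====
-- the six soundex consonant classes of Source B, indexed by their code 1..6
def pvSoundexGroups : List String := ["bfpv", "cgjkqsxz", "dt", "l", "mn", "r"]

def pvSoundexLenB (word : List Char) : Int :=
  let tail := word.drop 1
  -- sum(1 for g in groups if any(c in g for c in tail)) = countP; 'c in g' = Chars.isIn [c] g (exact)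
  1 + (pvSoundexGroups.countP (fun g => tail.any (fun c => PySem.Chars.isIn [c] g.toList)) : Int)

def soundex_comparison_alt (main_word : String) (check_word : String) : Int :=
  let score : Int := if pvSoundexLenB main_word.toList = pvSoundexLenB check_word.toList then 1 else -1
  score + (if PySem.Str.len main_word - 2 < PySem.Str.len check_word ∧
              PySem.Str.len check_word < PySem.Str.len main_word + 2 then 1 else -1)

-- ===== PRECONDITION & SPEC =====
def pvLetters : List Char := "abcdefghijklmnopqrstuvwxyz".toList

-- Pre_ excludes exactly the inputs where Python A raises: an empty word (IndexError on word[0])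
-- or any character after the first outside 'a'..'z' (KeyError in the table lookup).
def Pre_soundex_comparison (main_word : String) (check_word : String) : Prop :=
  main_word.toList ≠ [] ∧ check_word.toList ≠ [] ∧
  ((main_word.toList.drop 1 ++ check_word.toList.drop 1).all
    (fun c => decide (c ∈ pvLetters))) = true
instance (main_word : String) (check_word : String) : Decidable (Pre_soundex_comparison main_word check_word) := by unfold Pre_soundex_comparison; infer_instance

def pvWitness_soundex_comparison : String × String := ("Robert", "rupert")

def Spec_soundex_comparison (main_word : String) (check_word : String) (out : Int) : Prop := out = soundex_comparison_alt main_word check_word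
instance (main_word : String) (check_word : String) (out : Int) : Decidable (Spec_soundex_comparison main_word check_word out) := by unfold Spec_soundex_comparison; infer_instance

-- ===== CLAIM (what is proved, stated in full; the proofs are below) =====
def Claim_equal_soundex_comparison : Prop := ∀ (main_word : String) (check_word : String), Dom_soundex_comparison main_word check_word → Pre_soundex_comparison main_word check_word → Spec_soundex_comparison main_word check_word (soundex_comparison main_word check_word)

-- ===== LEMMAS AND PROOFS =====

def pvCode (c : Char) : Int := PySem.Dict.getD pvSoundexTable c 0

-- the mathematical shape of f7's loop after the first (char) element: dedup with explicit 'seen'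
def pvDedupSeen (s : List Int) : List Int → List Int
  | [] => []
  | c :: cs => if c ∈ s then pvDedupSeen s cs else c :: pvDedupSeen (s ++ [c]) cs

lemma pvF7go_inr (h : Char) (cs : List Int) :
    ∀ (s : List Int) (acc : List PvSEl),
      pvF7go (PvSEl.ch h :: s.map PvSEl.code) acc (cs.map PvSEl.code)
        = acc.reverse ++ (pvDedupSeen s cs).map PvSEl.code := by
  induction cs with
  | nil => intro s acc; simp [pvF7go, pvDedupSeen]
  | cons c cs ih =>
    intro s acc
    by_cases hc : c ∈ s
    · have hmem : (PvSEl.code c : PvSEl) ∈ PvSEl.ch h :: s.map PvSEl.code := by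
        simp [hc]
      simp only [List.map_cons, pvF7go, if_pos hmem, pvDedupSeen, if_pos hc]
      exact ih s acc
    · have hmem : (PvSEl.code c : PvSEl) ∉ PvSEl.ch h :: s.map PvSEl.code := by
        simp [hc]
      have hadd : PySem.Set.add (PvSEl.ch h :: s.map PvSEl.code) (PvSEl.code c)
          = PvSEl.ch h :: (s ++ [c]).map PvSEl.code := by
        rw [PySem.Set.add_of_not_mem hmem]; simp
      simp only [List.map_cons, pvF7go, if_neg hmem, pvDedupSeen, if_neg hc, hadd]
      rw [ih (s ++ [c]) (PvSEl.code c :: acc)]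
      simp

lemma pvDedupSeen_update : ∀ (cs s : List Int),
    (s : PySem.Set Int) ++ pvDedupSeen s cs = PySem.Set.update s cs := by
  intro cs
  induction cs with
  | nil => intro s; simp [pvDedupSeen, PySem.Set.update_nil]
  | cons c cs ih =>
    intro s
    rw [PySem.Set.update_cons]
    by_cases hc : c ∈ s
    · rw [PySem.Set.add_of_mem hc]
      simpa [pvDedupSeen, if_pos hc] using ih s
    · rw [PySem.Set.add_of_not_mem hc]
      simpa [pvDedupSeen, if_neg hc] using ih (s ++ [c])

lemma pvDedupSeen_nil_eq (cs : List Int) : pvDedupSeen [] cs = PySem.Set.ofList cs := by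
  have := pvDedupSeen_update cs []
  simpa [PySem.Set.update_empty] using this

-- A's soundex-list length as 1 + the size of the set of distinct non-zero tail codes
lemma pvGetSoundex_length (word : List Char) :
    ((pvGetSoundex word).length : Int)
      = 1 + PySem.Set.len (PySem.Set.discard
          (PySem.Set.ofList ((word.drop 1).map pvCode)) 0) := by
  simp only [pvGetSoundex]
  set h := (PySem.List.pyGet? word 0).getD ' ' with hh
  set codes := (word.drop 1).map pvCode with hcodes
  have hmap : (word.drop 1).map (fun c => PvSEl.code (PySem.Dict.getD pvSoundexTable c 0))
      = codes.map PvSEl.code := by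
    simp [hcodes, pvCode, List.map_map, Function.comp_def]
  rw [hmap]
  have hf7 : pvF7 (PvSEl.ch h :: codes.map PvSEl.code)
      = PvSEl.ch h :: (PySem.Set.ofList codes).map PvSEl.code := by
    show pvF7go PySem.Set.empty [] _ = _
    have hne : (PvSEl.ch h) ∉ (PySem.Set.empty : PySem.Set PvSEl) := by
      simp [PySem.Set.empty]
    rw [pvF7go, if_neg hne]
    have hadd : PySem.Set.add (PySem.Set.empty : PySem.Set PvSEl) (PvSEl.ch h)
        = PvSEl.ch h :: ([] : List Int).map PvSEl.code := by
      rw [PySem.Set.add_of_not_mem hne]; simp [PySem.Set.empty]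
    rw [hadd, pvF7go_inr h codes [] [PvSEl.ch h]]
    simp [pvDedupSeen_nil_eq]
  rw [hf7]
  have hbeq : (fun y : Int => !y == 0) = (fun x : Int => decide (x ≠ 0)) := by
    funext y; by_cases hy : y = 0 <;> simp [hy]
  have hfilter : (PvSEl.ch h :: (PySem.Set.ofList codes).map PvSEl.code).filter
        (fun i => i ≠ PvSEl.code 0)
      = PvSEl.ch h :: (((PySem.Set.ofList codes).filter (fun x => x ≠ 0)).map PvSEl.code) := by
    simp [List.filter_map, Function.comp_def]
  rw [hfilter]
  simp [PySem.Set.discard, PySem.Set.len, hbeq, Nat.add_comm]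

-- [c] is an infix of l iff c is an element of l  (port of Python's 'c in g' for a single char)
lemma pvSingleton_infix {c : Char} {l : List Char} : [c] <:+: l ↔ c ∈ l := by
  constructor
  · intro h; exact h.subset (List.mem_singleton_self c)
  · intro h
    obtain ⟨s, t, hst⟩ := List.append_of_mem h
    exact ⟨s, t, by simp [hst]⟩

-- per-letter facts, checked by the kernel over the 26 letters and 6 classes
def pvGroupCodes : List (Int × String) :=
  [(1, "bfpv"), (2, "cgjkqsxz"), (3, "dt"), (4, "l"), (5, "mn"), (6, "r")]

set_option maxRecDepth 8000 in
lemma pvChar_range_b :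
    (pvLetters.all (fun c => ([0, 1, 2, 3, 4, 5, 6] : List Int).contains (pvCode c))) = true := by
  decide

lemma pvChar_range : ∀ c ∈ pvLetters, pvCode c ∈ ([0, 1, 2, 3, 4, 5, 6] : List Int) := by
  have h := pvChar_range_b
  simp only [List.all_eq_true, List.contains_iff_mem] at h
  exact h

set_option maxRecDepth 40000 in
lemma pvChar_group_b :
    (pvGroupCodes.all (fun p => pvLetters.all
      (fun c => (pvCode c == p.1) == p.2.toList.contains c))) = true := by decide

lemma pvChar_group : ∀ p ∈ pvGroupCodes, ∀ c ∈ pvLetters,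
    (pvCode c = p.1) ↔ c ∈ p.2.toList := by
  have h := pvChar_group_b
  simp only [List.all_eq_true, beq_iff_eq] at h
  intro p hp c hc
  rw [← beq_iff_eq (a := pvCode c) (b := p.1), h p hp c hc, List.contains_iff_mem]

-- a nodup list contained in a nodup list m has length equal to m.countP (· ∈ l)
lemma pvLen_eq_countP (l m : List Int) (hl : l.Nodup) (hm : m.Nodup)
    (hsub : ∀ x ∈ l, x ∈ m) : l.length = m.countP (fun k => decide (k ∈ l)) := by
  rw [List.countP_eq_length_filter]
  have hfil : (m.filter (fun k => decide (k ∈ l))).toFinset = l.toFinset := by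
    ext x; simp; intro hx; exact hsub x hx
  have h1 := List.toFinset_card_of_nodup hl
  have h2 := List.toFinset_card_of_nodup (hm.filter (fun k => decide (k ∈ l)))
  rw [hfil] at h2
  omega

-- the core: the distinct non-zero tail-code count equals the class-intersection count
lemma pvCodeCount_eq (tail : List Char) (h : ∀ c ∈ tail, c ∈ pvLetters) :
    PySem.Set.len (PySem.Set.discard (PySem.Set.ofList (tail.map pvCode)) 0)
      = (pvSoundexGroups.countP (fun g => tail.any (fun c => PySem.Chars.isIn [c] g.toList)) : Int) := by
  set S := PySem.Set.discard (PySem.Set.ofList (tail.map pvCode)) 0 with hS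
  have hmemS : ∀ x : Int, x ∈ S ↔ (∃ c ∈ tail, pvCode c = x) ∧ x ≠ 0 := by
    intro x
    rw [hS, PySem.Set.mem_discard, PySem.Set.mem_ofList]
    simp [eq_comm]
  have hnd : S.Nodup := by
    rw [hS]; exact PySem.Set.nodup_discard _ _ (PySem.Set.nodup_ofList _)
  have hsub : ∀ x ∈ S, x ∈ ([1, 2, 3, 4, 5, 6] : List Int) := by
    intro x hx
    obtain ⟨⟨c, hc, hcx⟩, hx0⟩ := (hmemS x).mp hx
    have := pvChar_range c (h c hc)
    rw [hcx] at this
    simp at this ⊢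
    omega
  have hlen : (S.length : Int)
      = (([1, 2, 3, 4, 5, 6] : List Int).countP (fun k => decide (k ∈ S)) : Int) := by
    exact_mod_cast pvLen_eq_countP S [1, 2, 3, 4, 5, 6] hnd (by decide) hsub
  have hterm : ∀ p ∈ pvGroupCodes,
      decide (p.1 ∈ S) = tail.any (fun c => PySem.Chars.isIn [c] p.2.toList) := by
    intro p hp
    have hiff : p.1 ∈ S ↔ (tail.any (fun c => PySem.Chars.isIn [c] p.2.toList)) = true := by
      rw [hmemS]
      have hne : p.1 ≠ 0 := by
        fin_cases hp <;> decide
      simp only [List.any_eq_true]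
      constructor
      · rintro ⟨⟨c, hc, hcx⟩, -⟩
        exact ⟨c, hc, by rw [PySem.Chars.isIn_iff_infix, pvSingleton_infix]
                         exact (pvChar_group p hp c (h c hc)).mp hcx⟩
      · rintro ⟨c, hc, hcx⟩
        rw [PySem.Chars.isIn_iff_infix, pvSingleton_infix] at hcx
        exact ⟨⟨c, hc, (pvChar_group p hp c (h c hc)).mpr hcx⟩, hne⟩
    by_cases hx : p.1 ∈ S
    · simp [hx, hiff.mp hx]
    · simp only [hx, decide_false]
      by_contra hb
      exact hx (hiff.mpr (by revert hb; cases (tail.any (fun c => PySem.Chars.isIn [c] p.2.toList)) <;> simp))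
  have e1 := hterm (1, "bfpv") (by decide)
  have e2 := hterm (2, "cgjkqsxz") (by decide)
  have e3 := hterm (3, "dt") (by decide)
  have e4 := hterm (4, "l") (by decide)
  have e5 := hterm (5, "mn") (by decide)
  have e6 := hterm (6, "r") (by decide)
  rw [show PySem.Set.len S = (S.length : Int) from by simp [PySem.Set.len], hlen]
  simp only [pvSoundexGroups, List.countP_cons, List.countP_nil] at *
  simp only [← e1, ← e2, ← e3, ← e4, ← e5, ← e6]

lemma pvALen_eq (word : List Char) (h : ∀ c ∈ word.drop 1, c ∈ pvLetters) :
    ((pvGetSoundex word).length : Int) = pvSoundexLenB word := by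
  rw [pvGetSoundex_length, pvCodeCount_eq (word.drop 1) h]
  rfl

-- ===== VERDICT (by name: the statement is the Claim_ definition above) =====
theorem soundex_comparison_spec : Claim_equal_soundex_comparison := by
  intro mw cw _ hpre
  obtain ⟨-, -, hall⟩ := hpre
  simp only [List.all_append, Bool.and_eq_true, List.all_eq_true, decide_eq_true_eq] at hall
  show soundex_comparison mw cw = soundex_comparison_alt mw cw
  simp only [soundex_comparison, soundex_comparison_alt]
  have hm := pvALen_eq mw.toList hall.1
  have hc := pvALen_eq cw.toList hall.2
  have hiff : ((pvGetSoundex mw.toList).length = (pvGetSoundex cw.toList).length)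
      ↔ (pvSoundexLenB mw.toList = pvSoundexLenB cw.toList) := by
    rw [← hm, ← hc]
    exact ⟨fun h => by exact_mod_cast h, fun h => by exact_mod_cast h⟩
  by_cases h1 : (pvGetSoundex mw.toList).length = (pvGetSoundex cw.toList).length
  · have hB := hiff.mp h1
    rw [if_pos h1, if_pos hB]
    by_cases h2 : PySem.Str.len mw - 2 < PySem.Str.len cw ∧ PySem.Str.len cw < PySem.Str.len mw + 2
    · rw [if_pos h2, if_pos h2]; norm_num
    · rw [if_neg h2, if_neg h2]; norm_num
  · have hB := (not_congr hiff).mp h1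
    rw [if_neg h1, if_neg hB]
    by_cases h2 : PySem.Str.len mw - 2 < PySem.Str.len cw ∧ PySem.Str.len cw < PySem.Str.len mw + 2
    · rw [if_pos h2, if_pos h2]; norm_num
    · rw [if_neg h2, if_neg h2]; norm_num
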